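-- pv_equiv track=rewrite | github.com/AfterDarkMooN/data-protection | steganography/views.py | apply_steganography
-- ===== SOURCE A (Python) =====
-- def apply_steganography(source_text, hidden_text):
--     binary_hidden = ''.join(format(ord(char), '08b') for char in hidden_text)
--     result = []
--     bin_index = 0
--
--     for char in source_text:
--         if char.isalpha() and bin_index < len(binary_hidden):
--             if binary_hidden[bin_index] == '1':
--                 result.append(char.upper())
--             else:
--                 result.append(char.lower())
--             bin_index += 1
--         else:
--             result.append(char)
--
--     return ''.join(result)
-- ===== SOURCE B (Python) =====
-- def apply_steganography(source_text, hidden_text):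
--     # extract-transform-reinsert: pull out the letters, case them against the
--     # bit string in one zip (rest of the letters kept as-is), then stream the
--     # cased letters back into the non-letter skeleton of the source.
--     bits = ''.join(format(ord(ch), '08b') for ch in hidden_text)
--     letters = [c for c in source_text if c.isalpha()]
--     cased = [a.upper() if b == '1' else a.lower() for a, b in zip(letters, bits)]
--     cased += letters[len(bits):]
--     it = iter(cased)
--     return ''.join(next(it) if c.isalpha() else c for c in source_text)
-- ===== Notes on version B (the rewrite author's own statement) =====
-- stated objective: alternative
-- what changed: B is a three-stage extract-transform-reinsert algorithm: it pulls all letters out of the source, produces the cased letter stream in one zip with the bit string (remaining letters appended unchanged), and then re-interleaves that stream back into the non-letter skeleton of the source, instead of A's single pass with a running bin_index counter and in-loop casing.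
import Mathlib
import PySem

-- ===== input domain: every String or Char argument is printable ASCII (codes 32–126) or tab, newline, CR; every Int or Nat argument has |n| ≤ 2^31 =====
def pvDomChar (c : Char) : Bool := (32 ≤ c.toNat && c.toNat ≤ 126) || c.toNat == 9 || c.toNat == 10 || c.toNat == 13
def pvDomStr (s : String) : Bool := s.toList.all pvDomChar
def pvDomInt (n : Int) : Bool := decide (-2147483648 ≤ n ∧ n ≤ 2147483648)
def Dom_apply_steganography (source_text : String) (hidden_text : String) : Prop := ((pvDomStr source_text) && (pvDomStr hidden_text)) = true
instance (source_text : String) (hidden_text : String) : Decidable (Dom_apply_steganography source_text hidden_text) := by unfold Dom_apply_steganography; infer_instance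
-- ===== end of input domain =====

-- B replaces A's single counter-driven pass by a three-stage extract-transform-reinsert
-- algorithm (extract the letters, case them against the bits in one zip, stream them back
-- into the non-letter skeleton); alternative decomposition, same cost; return values
-- proved equal on all inputs.

-- ===== PORT A =====

-- format(ord(c), '08b'): binary digits of the (nonnegative) code point, left-padded
-- with '0' to width 8; exact for nonnegative codes (all of Char).
def pvFormat08b (c : Char) : List Char :=
  let bs := PySem.Int.toBinChars (c.toNat : Int)
  List.replicate (8 - bs.length) '0' ++ bs

def apply_steganography (source_text : String) (hidden_text : String) : String :=
  let binary_hidden : List Char := hidden_text.toList.flatMap pvFormat08b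
  let step : (List Char × Nat) → Char → (List Char × Nat) := fun (result, bin_index) char =>
    if PySem.Chars.isalpha char && decide (bin_index < binary_hidden.length) then
      if binary_hidden.getD bin_index '0' = '1' then
        (result ++ [PySem.Chars.upperChar char], bin_index + 1)
      else
        (result ++ [PySem.Chars.lowerChar char], bin_index + 1)
    else
      (result ++ [char], bin_index)
  String.mk (source_text.toList.foldl step ([], 0)).1

-- ===== PORT B =====

-- re-interleave: stream of cased letters fed back into the source; Python's next(it)
-- never exhausts because the stream holds exactly one letter per alpha position, so the
-- (unreachable) empty-stream branch keeps the char unchanged.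
def pvReinsert : List Char → List Char → List Char
  | [], _ => []
  | c :: cs, q =>
    if PySem.Chars.isalpha c then
      match q with
      | r :: q' => r :: pvReinsert cs q'
      | [] => c :: pvReinsert cs []
    else c :: pvReinsert cs q

def apply_steganography_alt (source_text : String) (hidden_text : String) : String :=
  let bits : List Char := hidden_text.toList.flatMap pvFormat08b
  let letters : List Char := source_text.toList.filter PySem.Chars.isalpha
  let cased : List Char :=
    ((letters.zip bits).map (fun ab =>
        if ab.2 = '1' then PySem.Chars.upperChar ab.1 else PySem.Chars.lowerChar ab.1))
      ++ letters.drop bits.length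
  String.mk (pvReinsert source_text.toList cased)

-- ===== PRECONDITION & SPEC =====
def Spec_apply_steganography (source_text : String) (hidden_text : String) (out : String) : Prop := out = apply_steganography_alt source_text hidden_text
instance (source_text : String) (hidden_text : String) (out : String) : Decidable (Spec_apply_steganography source_text hidden_text out) := by unfold Spec_apply_steganography; infer_instance

-- ===== CLAIM (what is proved, stated in full; the proofs are below) =====
def Claim_equal_apply_steganography : Prop := ∀ (source_text : String) (hidden_text : String), Dom_apply_steganography source_text hidden_text → Spec_apply_steganography source_text hidden_text (apply_steganography source_text hidden_text)

-- ===== LEMMAS AND PROOFS =====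

-- common reference function: case the alphabetic chars by the bits, consuming bits
def pvCore (cs : List Char) (bs : List Char) : List Char :=
  match cs, bs with
  | [], _ => []
  | c :: cs, bs =>
    if PySem.Chars.isalpha c then
      match bs with
      | [] => c :: pvCore cs []
      | b :: bs' =>
        (if b = '1' then PySem.Chars.upperChar c else PySem.Chars.lowerChar c) :: pvCore cs bs'
    else c :: pvCore cs bs

theorem pvCore_nil (cs : List Char) : pvCore cs [] = cs := by
  induction cs with
  | nil => rfl
  | cons c cs ih => by_cases h : PySem.Chars.isalpha c <;> simp [pvCore, h, ih]

-- A's fold equals pvCore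
theorem pvA_foldl (bits : List Char) (cs : List Char) :
    ∀ (acc : List Char) (i : Nat),
      (cs.foldl (fun (st : List Char × Nat) char =>
        if PySem.Chars.isalpha char && decide (st.2 < bits.length) then
          if bits.getD st.2 '0' = '1' then
            (st.1 ++ [PySem.Chars.upperChar char], st.2 + 1)
          else
            (st.1 ++ [PySem.Chars.lowerChar char], st.2 + 1)
        else
          (st.1 ++ [char], st.2)) (acc, i)).1 = acc ++ pvCore cs (bits.drop i) := by
  induction cs with
  | nil => intro acc i; simp [pvCore]
  | cons c cs ih =>
    intro acc i
    rw [List.foldl_cons]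
    by_cases ha : PySem.Chars.isalpha c
    · by_cases hi : i < bits.length
      · have hc : (PySem.Chars.isalpha c && decide (i < bits.length)) = true := by
          simp [ha, hi]
        have hgetD : bits.getD i '0' = bits[i] := List.getD_eq_getElem bits '0' hi
        have hdrop : bits.drop i = bits[i] :: bits.drop (i + 1) :=
          List.drop_eq_getElem_cons hi
        by_cases hb : bits.getD i '0' = '1'
        · rw [show (if PySem.Chars.isalpha c && decide (i < bits.length) then
              if bits.getD i '0' = '1' then (acc ++ [PySem.Chars.upperChar c], i + 1)
              else (acc ++ [PySem.Chars.lowerChar c], i + 1)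
            else (acc ++ [c], i)) = (acc ++ [PySem.Chars.upperChar c], i + 1) by
              rw [if_pos hc, if_pos hb]]
          rw [ih, hdrop]
          have hb' : bits[i] = '1' := by rw [← hgetD]; exact hb
          simp [pvCore, ha, hb']
        · rw [show (if PySem.Chars.isalpha c && decide (i < bits.length) then
              if bits.getD i '0' = '1' then (acc ++ [PySem.Chars.upperChar c], i + 1)
              else (acc ++ [PySem.Chars.lowerChar c], i + 1)
            else (acc ++ [c], i)) = (acc ++ [PySem.Chars.lowerChar c], i + 1) by
              rw [if_pos hc, if_neg hb]]
          rw [ih, hdrop]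
          rw [hgetD] at hb
          simp [pvCore, ha, hb]
      · have hc : ¬((PySem.Chars.isalpha c && decide (i < bits.length)) = true) := by
          simp [hi]
        have hd1 : bits.drop i = [] := List.drop_eq_nil_of_le (by omega)
        rw [show (if PySem.Chars.isalpha c && decide (i < bits.length) then
            if bits.getD i '0' = '1' then (acc ++ [PySem.Chars.upperChar c], i + 1)
            else (acc ++ [PySem.Chars.lowerChar c], i + 1)
          else (acc ++ [c], i)) = (acc ++ [c], i) by rw [if_neg hc]]
        rw [ih, hd1, pvCore_nil]
        simp [pvCore, ha, pvCore_nil]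
    · have hc : ¬((PySem.Chars.isalpha c && decide (i < bits.length)) = true) := by
        simp [ha]
      rw [show (if PySem.Chars.isalpha c && decide (i < bits.length) then
          if bits.getD i '0' = '1' then (acc ++ [PySem.Chars.upperChar c], i + 1)
          else (acc ++ [PySem.Chars.lowerChar c], i + 1)
        else (acc ++ [c], i)) = (acc ++ [c], i) by rw [if_neg hc]]
      rw [ih]
      simp [pvCore, ha]

-- B-side: the cased stream built from letters and bits
def pvCase (al bs : List Char) : List Char :=
  ((al.zip bs).map (fun ab =>
      if ab.2 = '1' then PySem.Chars.upperChar ab.1 else PySem.Chars.lowerChar ab.1))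
    ++ al.drop bs.length

theorem pvCase_nil (al : List Char) : pvCase al [] = al := by
  simp [pvCase]

-- reinserting the untouched letter stream reproduces the source
theorem pvReinsert_self (cs : List Char) :
    pvReinsert cs (cs.filter PySem.Chars.isalpha) = cs := by
  induction cs with
  | nil => rfl
  | cons c cs ih =>
    by_cases h : PySem.Chars.isalpha c <;> simp [pvReinsert, List.filter_cons, h, ih]

-- B's three stages compose to pvCore
theorem pvB_eq_core (cs : List Char) : ∀ (bs : List Char),
    pvReinsert cs (pvCase (cs.filter PySem.Chars.isalpha) bs) = pvCore cs bs := by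
  induction cs with
  | nil => intro bs; rfl
  | cons c cs ih =>
    intro bs
    by_cases h : PySem.Chars.isalpha c
    · rw [show (c :: cs).filter PySem.Chars.isalpha
          = c :: cs.filter PySem.Chars.isalpha by simp [List.filter_cons, h]]
      cases bs with
      | nil =>
        rw [pvCase_nil, show pvReinsert (c :: cs) (c :: cs.filter PySem.Chars.isalpha)
              = c :: pvReinsert cs (cs.filter PySem.Chars.isalpha) by simp [pvReinsert, h]]
        rw [pvReinsert_self]
        simp [pvCore, h, pvCore_nil]
      | cons b bs' =>
        rw [show pvCase (c :: cs.filter PySem.Chars.isalpha) (b :: bs')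
              = (if b = '1' then PySem.Chars.upperChar c else PySem.Chars.lowerChar c)
                :: pvCase (cs.filter PySem.Chars.isalpha) bs' by
            simp [pvCase, List.zip_cons_cons]]
        rw [show ∀ r q, pvReinsert (c :: cs) (r :: q) = r :: pvReinsert cs q by
            intro r q; simp [pvReinsert, h]]
        rw [ih bs']
        simp [pvCore, h]
    · rw [show (c :: cs).filter PySem.Chars.isalpha
          = cs.filter PySem.Chars.isalpha by simp [List.filter_cons, h]]
      rw [show pvReinsert (c :: cs) (pvCase (cs.filter PySem.Chars.isalpha) bs)
            = c :: pvReinsert cs (pvCase (cs.filter PySem.Chars.isalpha) bs) by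
          simp [pvReinsert, h]]
      rw [ih bs]
      simp [pvCore, h]

-- ===== VERDICT (by name: the statement is the Claim_ definition above) =====
theorem apply_steganography_spec : Claim_equal_apply_steganography := by
  intro s h _
  unfold Spec_apply_steganography apply_steganography apply_steganography_alt
  simp only []
  rw [pvA_foldl (h.toList.flatMap pvFormat08b) s.toList [] 0]
  rw [show ((s.toList.filter PySem.Chars.isalpha).zip (h.toList.flatMap pvFormat08b)).map
        (fun ab => if ab.2 = '1' then PySem.Chars.upperChar ab.1 else PySem.Chars.lowerChar ab.1)
        ++ (s.toList.filter PySem.Chars.isalpha).drop (h.toList.flatMap pvFormat08b).length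
      = pvCase (s.toList.filter PySem.Chars.isalpha) (h.toList.flatMap pvFormat08b) from rfl]
  rw [pvB_eq_core s.toList (h.toList.flatMap pvFormat08b)]
  simp
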